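-- pv_equiv track=rewrite | github.com/ZhihanCHEN-UoE/IBI1_2025-26 | Practical7/stop_codons.py | find_orf_stop_codons
-- ===== SOURCE A (Python) =====
-- START_CODON = 'ATG'
--
-- STOP_CODONS = {'TAA', 'TAG', 'TGA'}
--
-- def find_orf_stop_codons(sequence):
--     """Return stop codon types found in ORFs that start with ATG.
--
--     The sequence is checked in all three possible reading frames. Within each
--     frame, an ORF starts at ATG and ends at the first downstream in-frame stop
--     codon. This linear scan is fast enough for the full yeast FASTA file.
--     """
--     found_stop_codons = set()
--
--     for frame in range(3):
--         in_orf = False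
--
--         for pos in range(frame, len(sequence) - 2, 3):
--             codon = sequence[pos:pos + 3]
--
--             if not in_orf and codon == START_CODON:
--                 in_orf = True
--             elif in_orf and codon in STOP_CODONS:
--                 found_stop_codons.add(codon)
--                 in_orf = False
--
--     return found_stop_codons
-- ===== SOURCE B (Python) =====
-- START_CODON = 'ATG'
--
-- STOP_CODONS = {'TAA', 'TAG', 'TGA'}
--
-- def find_orf_stop_codons(sequence):
--     """Nested find-start/find-stop scan instead of the flag-driven single pass."""
--     found = set()
--     n = len(sequence)
--     for frame in range(3):
--         i = frame
--         while i <= n - 3: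
--             if sequence[i:i + 3] == START_CODON:
--                 j = i + 3
--                 while j <= n - 3 and sequence[j:j + 3] not in STOP_CODONS:
--                     j += 3
--                 if j <= n - 3:
--                     found.add(sequence[j:j + 3])
--                     i = j + 3
--                 else:
--                     break
--             else:
--                 i += 3
--     return found
-- ===== Notes on version B (the rewrite author's own statement) =====
-- stated objective: alternative
-- what changed: Replaces the single flag-driven linear pass per frame with a nested structure: an outer index loop that finds the next ATG and an inner while-loop that searches forward for the first in-frame stop codon, resuming after it (or ending the frame if none).
import Mathlib
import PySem

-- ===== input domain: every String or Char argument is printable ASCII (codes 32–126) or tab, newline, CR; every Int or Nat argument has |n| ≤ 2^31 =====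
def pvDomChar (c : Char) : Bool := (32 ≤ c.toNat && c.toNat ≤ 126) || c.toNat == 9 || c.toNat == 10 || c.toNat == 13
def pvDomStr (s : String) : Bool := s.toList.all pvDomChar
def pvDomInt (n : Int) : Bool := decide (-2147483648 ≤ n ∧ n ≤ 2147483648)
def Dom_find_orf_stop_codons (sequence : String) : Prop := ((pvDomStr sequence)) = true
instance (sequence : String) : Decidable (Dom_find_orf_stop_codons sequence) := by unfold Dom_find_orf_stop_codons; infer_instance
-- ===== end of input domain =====

-- B replaces A's flag-driven single pass per frame by a nested find-ATG / find-first-stop scan (alternative decomposition, same cost).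

-- ===== PORT A =====
def pvSTART : String := "ATG"
def pvSTOPS : PySem.Set String := PySem.Set.ofList ["TAA", "TAG", "TGA"]

def pvStepA (s : String) (st : PySem.Set String × Bool) (pos : Int) : PySem.Set String × Bool :=
  let codon := PySem.Str.slice s (some pos) (some (pos + 3))
  if st.2 = false ∧ codon = pvSTART then (st.1, true)
  else if st.2 = true ∧ codon ∈ pvSTOPS then (PySem.Set.add st.1 codon, false)
  else st

def find_orf_stop_codons (sequence : String) : List String :=
  (PySem.List.pyRange 0 3 1).foldl
    (fun found frame =>
      ((PySem.List.pyRange frame (PySem.Str.len sequence - 2) 3).foldl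
        (pvStepA sequence) (found, false)).1)
    PySem.Set.empty

-- ===== PORT B =====
-- Source B's inner while-loop (first in-frame stop at or after j, none if the frame ends first),
-- ported with a fuel parameter: fuel is only a bound on the iteration count (the loop itself
-- stops at j > n - 3); callers pass a provably sufficient fuel, so the port is exact.
def pvInnerB (s : String) (n : Int) : Nat → Int → Option Int
  | 0, _ => none
  | f + 1, j =>
    if j ≤ n - 3 then
      if PySem.Str.slice s (some j) (some (j + 3)) ∈ pvSTOPS then some j
      else pvInnerB s n f (j + 3)
    else none

-- Source B's outer while-loop, same fuel convention
def pvOuterB (s : String) (n : Int) : Nat → Int → PySem.Set String → PySem.Set String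
  | 0, _, found => found
  | f + 1, i, found =>
    if i ≤ n - 3 then
      if PySem.Str.slice s (some i) (some (i + 3)) = pvSTART then
        match pvInnerB s n f (i + 3) with
        | some j => pvOuterB s n f (j + 3) (PySem.Set.add found (PySem.Str.slice s (some j) (some (j + 3))))
        | none => found
      else pvOuterB s n f (i + 3) found
    else found

def find_orf_stop_codons_alt (sequence : String) : List String :=
  let n := PySem.Str.len sequence
  (PySem.List.pyRange 0 3 1).foldl (fun found frame => pvOuterB sequence n n.toNat frame found) PySem.Set.empty

-- ===== PRECONDITION & SPEC =====
def Spec_find_orf_stop_codons (sequence : String) (out : List String) : Prop := out = find_orf_stop_codons_alt sequence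
instance (sequence : String) (out : List String) : Decidable (Spec_find_orf_stop_codons sequence out) := by unfold Spec_find_orf_stop_codons; infer_instance

-- ===== CLAIM (what is proved, stated in full; the proofs are below) =====
def Claim_equal_find_orf_stop_codons : Prop := ∀ (sequence : String), Dom_find_orf_stop_codons sequence → Spec_find_orf_stop_codons sequence (find_orf_stop_codons sequence)

-- ===== LEMMAS AND PROOFS =====
theorem pyRange3_nil (a b : Int) (h : b ≤ a) : PySem.List.pyRange a b 3 = [] := by
  rw [PySem.List.pyRange_of_pos a b (by norm_num)]
  simp [show ¬ a < b by omega]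

theorem pyRange3_cons (a b : Int) (h : a < b) : PySem.List.pyRange a b 3 = a :: PySem.List.pyRange (a + 3) b 3 := by
  rw [PySem.List.pyRange_of_pos a b (by norm_num), PySem.List.pyRange_of_pos (a + 3) b (by norm_num)]
  by_cases h3 : a + 3 < b
  · rw [if_pos h, if_pos h3]
    have hm : ((b - a + 3 - 1) / 3).toNat = ((b - (a + 3) + 3 - 1) / 3).toNat + 1 := by omega
    rw [hm, List.range_succ_eq_map]
    simp only [List.map_cons, List.map_map]
    congr 1
    · simp
    · apply List.map_congr_left; intro k _
      simp [Function.comp, Nat.succ_eq_add_one]; ring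
  · rw [if_pos h, if_neg h3]
    have : ((b - a + 3 - 1) / 3).toNat = 1 := by omega
    rw [this]
    simp

theorem pvFrame (s : String) (k : Nat) : ∀ (i : Int) (found : PySem.Set String) (f g : Nat),
    (PySem.Str.len s - 2 - i).toNat = k →
    (PySem.Str.len s - 2 - i).toNat ≤ f →
    (PySem.Str.len s - 2 - i).toNat ≤ g →
    (((PySem.List.pyRange i (PySem.Str.len s - 2) 3).foldl (pvStepA s) (found, false)).1
        = pvOuterB s (PySem.Str.len s) f i found)
    ∧ (((PySem.List.pyRange i (PySem.Str.len s - 2) 3).foldl (pvStepA s) (found, true)).1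
        = match pvInnerB s (PySem.Str.len s) f i with
          | some j => pvOuterB s (PySem.Str.len s) g (j + 3)
              (PySem.Set.add found (PySem.Str.slice s (some j) (some (j + 3))))
          | none => found) := by
  induction k using Nat.strong_induction_on with
  | _ k ih =>
    intro i found f g hk hf hg
    set n := PySem.Str.len s with hn
    by_cases hi : i ≤ n - 3
    · have hk1 : 1 ≤ k := by omega
      obtain ⟨f', rfl⟩ : ∃ f', f = f' + 1 := ⟨f - 1, by omega⟩
      have hcons := pyRange3_cons i (n - 2) (by omega)
      have hk3 : (n - 2 - (i + 3)).toNat < k := by omega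
      have hf' : (n - 2 - (i + 3)).toNat ≤ f' := by omega
      constructor
      · rw [hcons, List.foldl_cons]
        show _ = pvOuterB s n (f' + 1) i found
        rw [pvOuterB, if_pos hi]
        by_cases hatg : PySem.Str.slice s (some i) (some (i + 3)) = pvSTART
        · rw [if_pos hatg]
          have hstep : pvStepA s (found, false) i = (found, true) := by
            simp [pvStepA, hatg]
          rw [hstep]
          exact (ih _ hk3 (i + 3) found f' f' rfl hf' hf').2
        · rw [if_neg hatg]
          have hstep : pvStepA s (found, false) i = (found, false) := by
            simp [pvStepA, hatg]
          rw [hstep]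
          exact (ih _ hk3 (i + 3) found f' g rfl hf' (by omega)).1
      · rw [hcons, List.foldl_cons]
        show _ = (match pvInnerB s n (f' + 1) i with
          | some j => pvOuterB s n g (j + 3) (PySem.Set.add found (PySem.Str.slice s (some j) (some (j + 3))))
          | none => found)
        rw [pvInnerB, if_pos hi]
        by_cases hstop : PySem.Str.slice s (some i) (some (i + 3)) ∈ pvSTOPS
        · rw [if_pos (by exact hstop)]
          have hstep : pvStepA s (found, true) i
              = (PySem.Set.add found (PySem.Str.slice s (some i) (some (i + 3))), false) := by
            simp [pvStepA, hstop]
          rw [hstep]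
          exact (ih _ hk3 (i + 3) _ g g rfl (by omega) (by omega)).1
        · rw [if_neg (by exact hstop)]
          have hstep : pvStepA s (found, true) i = (found, true) := by
            simp [pvStepA, hstop]
          rw [hstep]
          exact (ih _ hk3 (i + 3) found f' g rfl hf' (by omega)).2
    · have hnil := pyRange3_nil i (n - 2) (by omega)
      rw [hnil]
      constructor
      · cases f with
        | zero => rfl
        | succ f' => rw [pvOuterB, if_neg hi]; rfl
      · cases f with
        | zero => rfl
        | succ f' => rw [pvInnerB, if_neg hi]; rfl

-- ===== VERDICT (by name: the statement is the Claim_ definition above) =====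
theorem find_orf_stop_codons_spec : Claim_equal_find_orf_stop_codons := by
  intro s _
  unfold Spec_find_orf_stop_codons find_orf_stop_codons find_orf_stop_codons_alt
  have hr : PySem.List.pyRange 0 3 1 = [0, 1, 2] := by decide
  rw [hr]
  simp only [List.foldl_cons, List.foldl_nil]
  rw [(pvFrame s _ 0 PySem.Set.empty (PySem.Str.len s).toNat (PySem.Str.len s).toNat rfl (by omega) (by omega)).1]
  rw [(pvFrame s _ 1 _ (PySem.Str.len s).toNat (PySem.Str.len s).toNat rfl (by omega) (by omega)).1]
  rw [(pvFrame s _ 2 _ (PySem.Str.len s).toNat (PySem.Str.len s).toNat rfl (by omega) (by omega)).1]
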